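-- pv_equiv track=rewrite | github.com/girdeux31/programacion-recreativa | ch5_cryptography/roman_system.py | _split_roman_in_chunks
-- ===== SOURCE A (Python) =====
-- from typing import List
--
-- ROMAN_TO_DECIMAL = {
--     'I': 1,
--     'V': 5,
--     'X': 10,
--     'L': 50,
--     'C': 100,
--     'D': 500,
--     'M': 1000
-- }
--
-- def _split_roman_in_chunks(roman: str) -> List[str]:
--
--     chunks = []
--     i_start = 0
--
--     while i_start <= len(roman)-1:
--
--         chunk = ''
--         for i in range(i_start, len(roman)):
--
--             current_decimal = ROMAN_TO_DECIMAL[roman[i]]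
--             next_decimal = ROMAN_TO_DECIMAL[roman[i+1]] if i+1 < len(roman) else None
--             chunk += roman[i]
--             i_start += 1
--
--             if next_decimal and next_decimal < current_decimal:
--                 break
--
--         chunks.append(chunk)
--
--     return chunks
-- ===== SOURCE B (Python) =====
-- from typing import List
--
-- ROMAN_TO_DECIMAL = {
--     'I': 1,
--     'V': 5,
--     'X': 10,
--     'L': 50,
--     'C': 100,
--     'D': 500,
--     'M': 1000
-- }
--
-- def _split_roman_in_chunks(roman: str) -> List[str]:
--     if not roman:
--         return []
--     values = [ROMAN_TO_DECIMAL[ch] for ch in roman]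
--     cuts = [0] + [i for i, (prev, cur) in enumerate(zip(values, values[1:]), 1) if cur < prev] + [len(roman)]
--     return [roman[a:b] for a, b in zip(cuts, cuts[1:])]
-- ===== Notes on version B (the rewrite author's own statement) =====
-- stated objective: alternative
-- what changed: Replaced A's nested while/for consuming characters with lookahead+break by a staged pipeline: one pass builds the value list, a second collects the cut indices (positions where the value drops), and the result is produced by slicing the string between consecutive cuts.
import Mathlib
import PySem

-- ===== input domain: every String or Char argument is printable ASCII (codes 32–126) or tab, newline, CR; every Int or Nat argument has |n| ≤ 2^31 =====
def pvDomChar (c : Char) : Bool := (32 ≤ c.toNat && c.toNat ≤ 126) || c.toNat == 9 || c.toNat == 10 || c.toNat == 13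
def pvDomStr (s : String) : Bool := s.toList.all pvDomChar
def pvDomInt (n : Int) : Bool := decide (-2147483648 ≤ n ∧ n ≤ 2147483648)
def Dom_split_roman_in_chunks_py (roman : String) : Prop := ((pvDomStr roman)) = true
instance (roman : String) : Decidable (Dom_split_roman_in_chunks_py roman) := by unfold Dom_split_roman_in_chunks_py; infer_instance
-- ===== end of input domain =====

-- B replaces A's nested while/for with lookahead+break by a staged pipeline:
-- value list, then cut indices, then slicing between consecutive cuts (alternative; same cost).

-- ===== PORT A =====
-- ROMAN_TO_DECIMAL[c]; on Pre_ every looked-up char is a key, so the total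
-- default 0 is never the value actually used (a missing key is a KeyError,
-- excluded by Pre_).
def romanVal (c : Char) : Int :=
  if c = 'I' then 1 else if c = 'V' then 5 else if c = 'X' then 10
  else if c = 'L' then 50 else if c = 'C' then 100 else if c = 'D' then 500
  else if c = 'M' then 1000 else 0

-- inner `for i in range(i_start, len(roman))` with break: consumes chars into
-- `chunk`, breaking when the NEXT char's value is smaller; returns (chunk, rest).
def aChunk : List Char → List Char × List Char
  | [] => ([], [])
  | c :: rest =>
    match rest with
    | [] => ([c], [])
    | n :: _ =>
      if romanVal n < romanVal c then ([c], rest)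
      else
        let p := aChunk rest
        (c :: p.1, p.2)

theorem aChunk_snd_length : ∀ (l : List Char) (c : Char), (aChunk (c :: l)).2.length ≤ l.length := by
  intro l
  induction l with
  | nil => intro c; simp [aChunk]
  | cons n rest ih =>
    intro c
    simp only [aChunk]
    split
    · simp
    · simpa using Nat.le_succ_of_le (ih n)

-- outer `while i_start <= len(roman)-1`
def aLoop : List Char → List (List Char)
  | [] => []
  | c :: rest =>
    let p := aChunk (c :: rest)
    p.1 :: aLoop p.2
  termination_by l => l.length
  decreasing_by
    simpa using Nat.lt_succ_of_le (aChunk_snd_length rest c)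

def split_roman_in_chunks_py (roman : String) : List String :=
  (aLoop roman.toList).map String.ofList

-- ===== PORT B =====
-- `values = [ROMAN_TO_DECIMAL[ch] for ch in roman]`
def bVals (l : List Char) : List Int := l.map romanVal

-- `cuts = [0] + [i for i, (prev, cur) in enumerate(zip(values, values[1:]), 1) if cur < prev] + [len(roman)]`
-- (`values[1:]` ported as `.drop 1`, exact since the bound 1 is nonnegative)
def bCuts (l : List Char) : List Int :=
  0 :: ((PySem.List.enumerate ((bVals l).zip ((bVals l).drop 1)) 1).filter
        (fun x => x.2.2 < x.2.1)).map (fun x => x.1) ++ [(l.length : Int)]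

-- `if not roman: return []` then `[roman[a:b] for a, b in zip(cuts, cuts[1:])]`
def split_roman_in_chunks_py_alt (roman : String) : List String :=
  let l := roman.toList
  if l.isEmpty then []
  else ((bCuts l).zip ((bCuts l).drop 1)).map
    (fun ab => String.ofList (PySem.List.slice l (some ab.1) (some ab.2)))

-- ===== PRECONDITION & SPEC =====
-- Pre_ excludes exactly the strings containing a character that is not a key of
-- ROMAN_TO_DECIMAL, on which the Python A raises KeyError.
def Pre_split_roman_in_chunks_py (roman : String) : Prop :=
  (roman.toList.all (fun c => c ∈ (['I','V','X','L','C','D','M'] : List Char))) = true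
instance (roman : String) : Decidable (Pre_split_roman_in_chunks_py roman) := by
  unfold Pre_split_roman_in_chunks_py; infer_instance

def pvWitness_split_roman_in_chunks_py : String := "MCMXIV"

def Spec_split_roman_in_chunks_py (roman : String) (out : List String) : Prop := out = split_roman_in_chunks_py_alt roman
instance (roman : String) (out : List String) : Decidable (Spec_split_roman_in_chunks_py roman out) := by unfold Spec_split_roman_in_chunks_py; infer_instance

-- ===== CLAIM (what is proved, stated in full; the proofs are below) =====
def Claim_equal_split_roman_in_chunks_py : Prop := ∀ (roman : String), Dom_split_roman_in_chunks_py roman → Pre_split_roman_in_chunks_py roman → Spec_split_roman_in_chunks_py roman (split_roman_in_chunks_py roman)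

-- ===== LEMMAS AND PROOFS =====

-- B's chunk list on the list side (the body of the non-empty branch of the alt port)
def body (l : List Char) : List (List Char) :=
  ((bCuts l).zip ((bCuts l).drop 1)).map
    (fun ab => PySem.List.slice l (some ab.1) (some ab.2))

-- descent-index list (the middle comprehension of bCuts)
def descs (l : List Char) : List Int :=
  ((PySem.List.enumerate ((bVals l).zip ((bVals l).drop 1)) 1).filter
        (fun x => x.2.2 < x.2.1)).map (fun x => x.1)

theorem bCuts_eq (l : List Char) : bCuts l = 0 :: (descs l ++ [(l.length : Int)]) := by
  simp [bCuts, descs]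

-- shifting the start of enumerate shifts every kept index by one
theorem enum_filter_shift (xs : List (Int × Int)) : ∀ (k : Int),
    ((PySem.List.enumerate xs (k+1)).filter (fun x => x.2.2 < x.2.1)).map (fun x => x.1)
      = (((PySem.List.enumerate xs k).filter (fun x => x.2.2 < x.2.1)).map (fun x => x.1)).map (· + 1) := by
  induction xs with
  | nil => intro k; simp [PySem.List.enumerate_nil]
  | cons x xs ih =>
    intro k
    rw [PySem.List.enumerate_cons, PySem.List.enumerate_cons]
    by_cases h : x.2 < x.1
    · simp only [List.filter_cons, h, decide_true, if_true, List.map_cons]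
      rw [ih (k+1)]
    · simp only [List.filter_cons, h, decide_false, Bool.false_eq_true, if_false]
      rw [ih (k+1)]

-- structural equation for descs on a two-or-more element list
theorem descs_cons (c n : Char) (rest : List Char) :
    descs (c :: n :: rest)
      = (if romanVal n < romanVal c then [1] else []) ++ (descs (n :: rest)).map (· + 1) := by
  have hz : (bVals (c :: n :: rest)).zip ((bVals (c :: n :: rest)).drop 1)
      = (romanVal c, romanVal n) :: ((bVals (n :: rest)).zip ((bVals (n :: rest)).drop 1)) := by
    simp [bVals]
  unfold descs
  rw [hz, PySem.List.enumerate_cons]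
  by_cases h : romanVal n < romanVal c
  · simp only [List.filter_cons, h, decide_true, if_true, List.map_cons]
    rw [enum_filter_shift _ 1]
    simp
  · simp only [List.filter_cons, h, decide_false, Bool.false_eq_true, if_false]
    rw [enum_filter_shift _ 1]
    simp

theorem descs_pos (l : List Char) : ∀ x ∈ descs l, 1 ≤ x := by
  intro x hx
  unfold descs at hx
  obtain ⟨p, hp, rfl⟩ := List.mem_map.mp hx
  have hp' := List.mem_of_mem_filter hp
  have : p.1 ∈ (PySem.List.enumerate ((bVals l).zip ((bVals l).drop 1)) 1).map (·.1) :=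
    List.mem_map.mpr ⟨p, hp', rfl⟩
  rw [PySem.List.map_fst_enumerate] at this
  exact (PySem.List.mem_pyRange_one.mp this).1

theorem cuts_nonneg (l : List Char) : ∀ x ∈ bCuts l, 0 ≤ x := by
  intro x hx
  rw [bCuts_eq] at hx
  rcases List.mem_cons.mp hx with rfl | hx2
  · norm_num
  rcases List.mem_append.mp hx2 with h | h
  · exact le_trans (by norm_num) (descs_pos l x h)
  · simp at h; omega

-- shifting a slice one char into a cons
theorem slice_cons_shift (c : Char) (l : List Char) (a b : Int) (ha : 0 ≤ a) (hb : 0 ≤ b) :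
    PySem.List.slice (c :: l) (some (a+1)) (some (b+1)) = PySem.List.slice l (some a) (some b) := by
  rw [PySem.List.slice_toNat _ (by omega) (by omega), PySem.List.slice_toNat _ ha hb]
  rw [Int.toNat_add ha (by norm_num), Int.toNat_add hb (by norm_num)]
  simp

theorem slice_zero_cons (c : Char) (l : List Char) (b : Int) (hb : 0 ≤ b) :
    PySem.List.slice (c :: l) (some 0) (some (b+1)) = c :: PySem.List.slice l (some 0) (some b) := by
  rw [PySem.List.slice_toNat _ (by omega) (by omega), PySem.List.slice_toNat _ le_rfl hb]
  rw [Int.toNat_add hb (by norm_num)]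
  simp [List.take_succ_cons]

-- zipping a list with its own tail after `map (+1)` gives the same slice chunks one char in
theorem zip_shift_slices (c : Char) (l : List Char) (t : List Int) (ht : ∀ x ∈ t, 0 ≤ x) :
    ((t.map (· + 1)).zip ((t.map (· + 1)).drop 1)).map
        (fun ab => PySem.List.slice (c :: l) (some ab.1) (some ab.2))
      = (t.zip (t.drop 1)).map (fun ab => PySem.List.slice l (some ab.1) (some ab.2)) := by
  rw [← List.map_drop, List.zip_map, List.map_map]
  apply List.map_congr_left
  intro ab hab
  obtain ⟨h1, h2⟩ := List.of_mem_zip hab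
  have ha := ht ab.1 h1
  have hbb := ht ab.2 (List.mem_of_mem_drop h2)
  simpa using slice_cons_shift c l ab.1 ab.2 ha hbb

-- main lemma: for non-empty l, B's slice pipeline computes A's chunking
theorem body_eq_aLoop : ∀ (fuel : Nat) (l : List Char), l.length ≤ fuel → l ≠ [] →
    body l = aLoop l := by
  intro fuel
  induction fuel with
  | zero =>
    intro l hlen hne
    exact absurd (List.eq_nil_of_length_eq_zero (Nat.le_zero.mp hlen)) hne
  | succ f ih =>
    intro l hlen hne
    match l with
    | [c] =>
      simp [body, bCuts, bVals, PySem.List.enumerate_nil, aLoop, aChunk,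
        PySem.List.slice_toNat, List.zip]
    | c :: n :: rest =>
      have hlen' : (n :: rest).length ≤ f := by simpa using Nat.lt_succ_iff.mp (by simpa using hlen)
      have hcuts := bCuts_eq (c :: n :: rest)
      rw [descs_cons] at hcuts
      by_cases h : romanVal n < romanVal c
      · -- descent right after c: A's chunk is [c]
        have hc : bCuts (c :: n :: rest) = 0 :: (bCuts (n :: rest)).map (· + 1) := by
          rw [hcuts, if_pos h, bCuts_eq (n :: rest)]
          simp [List.map_append]
        obtain ⟨u, hu⟩ : ∃ u, (bCuts (n :: rest)).map (· + 1) = 1 :: u :=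
          ⟨(descs (n :: rest) ++ [((n :: rest).length : Int)]).map (· + 1), by
            rw [bCuts_eq]; simp⟩
        have hbody : body (c :: n :: rest)
            = PySem.List.slice (c :: n :: rest) (some 0) (some 1)
              :: (((bCuts (n :: rest)).map (· + 1)).zip ((((bCuts (n :: rest)).map (· + 1))).drop 1)).map
                 (fun ab => PySem.List.slice (c :: n :: rest) (some ab.1) (some ab.2)) := by
          unfold body
          rw [hc, hu]
          simp [List.zip]
        rw [hbody, zip_shift_slices c (n :: rest) _ (cuts_nonneg (n :: rest))]
        have hrest : ((bCuts (n :: rest)).zip ((bCuts (n :: rest)).drop 1)).map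
            (fun ab => PySem.List.slice (n :: rest) (some ab.1) (some ab.2)) = body (n :: rest) := rfl
        rw [hrest, ih (n :: rest) hlen' (by simp)]
        have hs1 : PySem.List.slice (c :: n :: rest) (some 0) (some 1) = [c] := by
          rw [PySem.List.slice_toNat _ le_rfl (by norm_num)]; simp
        have ha : aLoop (c :: n :: rest) = [c] :: aLoop (n :: rest) := by
          rw [aLoop]; simp [aChunk, h]
        rw [hs1, ha]
      · -- no descent: c extends the first chunk of (n :: rest)
        have hc : bCuts (c :: n :: rest)
            = 0 :: (descs (n :: rest) ++ [((n :: rest).length : Int)]).map (· + 1) := by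
          rw [hcuts, if_neg h]
          simp [List.map_append]
        obtain ⟨hd, tl, hht⟩ : ∃ hd tl, descs (n :: rest) ++ [((n :: rest).length : Int)] = hd :: tl := by
          cases hdm : descs (n :: rest) with
          | nil => exact ⟨((n :: rest).length : Int), [], by simp⟩
          | cons a t => exact ⟨a, t ++ [((n :: rest).length : Int)], by simp⟩
        have htpos : ∀ x ∈ descs (n :: rest) ++ [((n :: rest).length : Int)], 0 ≤ x := by
          intro x hx
          have := cuts_nonneg (n :: rest) x (by rw [bCuts_eq]; exact List.mem_cons_of_mem _ hx)
          exact this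
        have hbody : body (c :: n :: rest)
            = PySem.List.slice (c :: n :: rest) (some 0) (some (hd + 1))
              :: (((hd :: tl).map (· + 1)).zip (((hd :: tl).map (· + 1)).drop 1)).map
                 (fun ab => PySem.List.slice (c :: n :: rest) (some ab.1) (some ab.2)) := by
          unfold body
          rw [hc, hht]
          simp [List.zip]
        have hbody' : body (n :: rest)
            = PySem.List.slice (n :: rest) (some 0) (some hd)
              :: ((hd :: tl).zip ((hd :: tl).drop 1)).map
                 (fun ab => PySem.List.slice (n :: rest) (some ab.1) (some ab.2)) := by
          unfold body
          rw [bCuts_eq, hht]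
          simp [List.zip]
        have hdpos : 0 ≤ hd := htpos hd (by rw [hht]; exact List.mem_cons_self)
        have hIH := ih (n :: rest) hlen' (by simp)
        rw [hbody', aLoop] at hIH
        have h1 : PySem.List.slice (n :: rest) (some 0) (some hd) = (aChunk (n :: rest)).1 :=
          (List.cons.injEq _ _ _ _ ▸ hIH).1
        have h2 : ((hd :: tl).zip ((hd :: tl).drop 1)).map
              (fun ab => PySem.List.slice (n :: rest) (some ab.1) (some ab.2))
            = aLoop (aChunk (n :: rest)).2 :=
          (List.cons.injEq _ _ _ _ ▸ hIH).2
        rw [hbody, zip_shift_slices c (n :: rest) (hd :: tl) (hht ▸ htpos), h2,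
          slice_zero_cons c (n :: rest) hd hdpos, h1, aLoop]
        simp [aChunk, h]

theorem ports_agree (roman : String) :
    split_roman_in_chunks_py roman = split_roman_in_chunks_py_alt roman := by
  unfold split_roman_in_chunks_py split_roman_in_chunks_py_alt
  match hl : roman.toList with
  | [] => simp [aLoop]
  | c :: rest =>
    have := body_eq_aLoop (c :: rest).length (c :: rest) le_rfl (by simp)
    simp only [List.isEmpty_cons, if_neg Bool.false_ne_true, ← this, body]
    simp

-- ===== VERDICT (by name: the statement is the Claim_ definition above) =====
theorem split_roman_in_chunks_py_spec : Claim_equal_split_roman_in_chunks_py := by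
  intro roman _ _
  unfold Spec_split_roman_in_chunks_py
  exact ports_agree roman
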